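-- pv_equiv track=rewrite | github.com/zzhang82/Agent-Memory-Bridge | src/agent_mem_bridge/query.py | find_ordered_span
-- ===== SOURCE A (Python) =====
-- def find_ordered_span(query_tokens: list[str], field_tokens: list[str]) -> int | None:
--     if not query_tokens or not field_tokens:
--         return None
--     best_span: int | None = None
--     first = query_tokens[0]
--     start_positions = [index for index, token in enumerate(field_tokens) if token == first]
--     for start in start_positions:
--         current = start
--         matched = True
--         for token in query_tokens[1:]:
--             try:
--                 current = field_tokens.index(token, current + 1)
--             except ValueError:
--                 matched = False
--                 break
--         if not matched:
--             continue
--         span = current - start + 1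
--         if best_span is None or span < best_span:
--             best_span = span
--     return best_span
-- ===== SOURCE B (Python) =====
-- from bisect import bisect_right
--
--
-- def find_ordered_span(query_tokens: list[str], field_tokens: list[str]) -> int | None:
--     if not query_tokens or not field_tokens:
--         return None
--     positions: dict[str, list[int]] = {}
--     for index, token in enumerate(field_tokens):
--         positions.setdefault(token, []).append(index)
--     rest = query_tokens[1:]
--     target = len(query_tokens)  # a span covers len(query_tokens) distinct positions, so it can never be shorter
--     best_span: int | None = None
--     for start in positions.get(query_tokens[0], []):
--         current = start
--         matched = True
--         for token in rest:
--             occ = positions.get(token, [])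
--             k = bisect_right(occ, current)
--             if k == len(occ):
--                 matched = False
--                 break
--             current = occ[k]
--         if not matched:
--             continue
--         span = current - start + 1
--         if best_span is None or span < best_span:
--             best_span = span
--         if best_span == target:
--             break
--     return best_span
-- ===== Notes on version B (the rewrite author's own statement) =====
-- stated objective: faster
-- what changed: B builds a token->sorted-positions index in one pass and finds each next occurrence by bisect on that token's position list (instead of A's repeated linear field_tokens.index scans), and breaks out of the start loop once best_span reaches the unbeatable minimum len(query_tokens).
import Mathlib
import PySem

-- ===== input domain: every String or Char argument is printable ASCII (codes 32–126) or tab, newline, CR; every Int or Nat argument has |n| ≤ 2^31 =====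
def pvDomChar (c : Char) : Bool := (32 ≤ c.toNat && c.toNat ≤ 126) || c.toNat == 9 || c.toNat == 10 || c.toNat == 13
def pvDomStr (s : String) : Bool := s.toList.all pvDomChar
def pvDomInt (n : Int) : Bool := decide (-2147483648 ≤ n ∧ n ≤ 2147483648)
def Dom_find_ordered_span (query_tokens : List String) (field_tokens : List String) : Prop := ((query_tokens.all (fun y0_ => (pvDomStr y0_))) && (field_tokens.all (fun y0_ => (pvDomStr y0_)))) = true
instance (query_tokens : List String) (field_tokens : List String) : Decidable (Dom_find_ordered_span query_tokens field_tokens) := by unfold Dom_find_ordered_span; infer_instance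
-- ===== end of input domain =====

-- B replaces A's repeated linear field_tokens.index scans by a precomputed token→positions
-- index queried with bisect (objective: faster; the proof is return-value equivalence).

-- ===== PORT A =====
-- fs.index(t, k) for 0 ≤ k: Python searches fs[k:] and reports the absolute index; exact for 0 ≤ k
-- (the only calls made have k = current+1 ≥ 1).
def pvIndexFrom (fs : List String) (t : String) (k : Int) : Option Int :=
  (PySem.List.index? (PySem.List.slice fs (some k) none) t).map (fun j => k + (j : Int))

-- the inner 'for token in query_tokens[1:]' with the matched/break flag: none = matched False
def pvAStep (fs : List String) (cur : Option Int) (t : String) : Option Int :=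
  match cur with
  | none => none
  | some c => pvIndexFrom fs t (c + 1)

def find_ordered_span (query_tokens : List String) (field_tokens : List String) : Option Int :=
  match query_tokens, field_tokens with
  | [], _ => none
  | _ :: _, [] => none
  | first :: rest, f0 :: frest =>
    let fs := f0 :: frest
    let start_positions := ((PySem.List.enumerate fs).filter (fun p => p.2 == first)).map (fun p => p.1)
    start_positions.foldl (fun best start =>
      match rest.foldl (pvAStep fs) (some start) with
      | none => best
      | some current =>
        let span := current - start + 1
        match best with
        | none => some span
        | some b => if span < b then some span else best) none

-- ===== PORT B =====
-- positions.setdefault(token, []).append(index)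
def pvPositions (fs : List String) : PySem.Dict String (List Int) :=
  (PySem.List.enumerate fs).foldl (fun d p => d.modify p.2 [] (fun l => l ++ [p.1])) PySem.Dict.empty

-- inner loop of B: bisect_right on the token's position list; none = matched False
-- occ = positions.get(token, []); k = bisect_right(occ, current); occ[k] is in range since k ≠ len(occ)
def pvBStep (pos : PySem.Dict String (List Int)) (cur : Option Int) (t : String) : Option Int :=
  match cur with
  | none => none
  | some c =>
    if PySem.List.bisectRight (pos.getD t []) c = (pos.getD t []).length then none
    else some (PySem.List.pyGetD (pos.getD t [])
      ((PySem.List.bisectRight (pos.getD t []) c : Nat) : Int) 0)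

-- body of B's outer loop: try one start position, update best_span
def pvBOuter (pos : PySem.Dict String (List Int)) (rest : List String)
    (best : Option Int) (start : Int) : Option Int :=
  match rest.foldl (pvBStep pos) (some start) with
  | none => best
  | some current =>
    let span := current - start + 1
    match best with
    | none => some span
    | some b => if span < b then some span else best

-- B's outer loop with its early break once best_span == target
def pvBFold (pos : PySem.Dict String (List Int)) (rest : List String) (target : Int) :
    List Int → Option Int → Option Int
  | [], best => best
  | s :: ss, best =>
    let best' := pvBOuter pos rest best s
    if best' = some target then best' else pvBFold pos rest target ss best'

def find_ordered_span_alt (query_tokens : List String) (field_tokens : List String) : Option Int :=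
  match query_tokens, field_tokens with
  | [], _ => none
  | _ :: _, [] => none
  | first :: rest, f0 :: frest =>
    let fs := f0 :: frest
    let pos := pvPositions fs
    pvBFold pos rest ((first :: rest).length : Int) (pos.getD first []) none

-- ===== PRECONDITION & SPEC =====
def Spec_find_ordered_span (query_tokens : List String) (field_tokens : List String) (out : Option Int) : Prop := out = find_ordered_span_alt query_tokens field_tokens
instance (query_tokens : List String) (field_tokens : List String) (out : Option Int) : Decidable (Spec_find_ordered_span query_tokens field_tokens out) := by unfold Spec_find_ordered_span; infer_instance

-- ===== CLAIM (what is proved, stated in full; the proofs are below) =====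
def Claim_equal_find_ordered_span : Prop := ∀ (query_tokens : List String) (field_tokens : List String), Dom_find_ordered_span query_tokens field_tokens → Spec_find_ordered_span query_tokens field_tokens (find_ordered_span query_tokens field_tokens)

-- ===== LEMMAS AND PROOFS =====

-- occurrence list of token t in fs when enumeration starts at s
def pvOcc (fs : List String) (t : String) (s : Int) : List Int :=
  ((PySem.List.enumerate fs s).filter (fun p => p.2 == t)).map (fun p => p.1)

theorem pvOcc_nil (t : String) (s : Int) : pvOcc [] t s = [] := rfl

theorem pvOcc_cons (x : String) (xs : List String) (t : String) (s : Int) :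
    pvOcc (x :: xs) t s = (if x == t then [s] else []) ++ pvOcc xs t (s + 1) := by
  simp only [pvOcc, PySem.List.enumerate_cons, List.filter_cons]
  by_cases h : x = t <;> simp [h]

theorem pvOcc_lb (fs : List String) (t : String) (s : Int) :
    ∀ x ∈ pvOcc fs t s, s ≤ x := by
  induction fs generalizing s with
  | nil => simp [pvOcc_nil]
  | cons y ys ih =>
    intro x hx
    rw [pvOcc_cons] at hx
    rcases List.mem_append.1 hx with h | h
    · by_cases hy : y == t
      · simp [hy] at h; omega
      · simp [hy] at h
    · have := ih (s + 1) x h; omega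

theorem pvOcc_sorted (fs : List String) (t : String) (s : Int) :
    (pvOcc fs t s).Pairwise (· ≤ ·) := by
  induction fs generalizing s with
  | nil => simp [pvOcc_nil]
  | cons y ys ih =>
    rw [pvOcc_cons]
    apply List.pairwise_append.2
    refine ⟨?_, ih (s + 1), ?_⟩
    · by_cases hy : y == t <;> simp [hy]
    · intro a ha b hb
      by_cases hy : y == t
      · simp [hy] at ha
        have := pvOcc_lb ys t (s + 1) b hb; omega
      · simp [hy] at ha

-- the dictionary built by B holds exactly the occurrence lists
theorem pvPositions_fold (fs : List String) (t : String) (s : Int)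
    (d : PySem.Dict String (List Int)) :
    (((PySem.List.enumerate fs s).foldl
        (fun d p => d.modify p.2 [] (fun l => l ++ [p.1])) d).getD t [])
      = d.getD t [] ++ pvOcc fs t s := by
  induction fs generalizing s d with
  | nil => simp [pvOcc_nil, PySem.List.enumerate_nil]
  | cons y ys ih =>
    rw [PySem.List.enumerate_cons, pvOcc_cons]
    simp only [List.foldl_cons]
    rw [ih]
    by_cases h : y = t
    · subst h
      rw [PySem.Dict.getD_modify_self]
      simp
    · rw [PySem.Dict.getD_modify_of_ne d [] (fun l => l ++ [(s : Int)]) (by exact fun hc => h hc.symm)]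
      simp [h]

theorem pvPositions_getD (fs : List String) (t : String) :
    (pvPositions fs).getD t [] = pvOcc fs t 0 := by
  unfold pvPositions
  rw [pvPositions_fold]
  simp [PySem.Dict.getD, PySem.Dict.empty, PySem.Dict.get?]

-- find? on a list whose entries are "false below k, true from k on" returns occ[k]?
theorem pvFind_split (p : Int → Bool) :
    ∀ (occ : List Int) (k : Nat), k ≤ occ.length →
    (∀ j (hj : j < occ.length), j < k → p occ[j] = false) →
    (∀ j (hj : j < occ.length), k ≤ j → p occ[j] = true) →
    occ.find? p = occ[k]? := by
  intro occ
  induction occ with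
  | nil => intro k hk _ _; simp at hk; simp [hk]
  | cons x xs ih =>
    intro k hk h1 h2
    cases k with
    | zero =>
      have hx := h2 0 (by simp) (by omega)
      simp at hx
      simp [hx]
    | succ k' =>
      have hx := h1 0 (by simp) (by omega)
      simp at hx
      rw [List.find?_cons, hx]
      simp only [List.getElem?_cons_succ]
      exact ih k' (by simpa using hk)
        (fun j hj hjk => h1 (j + 1) (by simpa using hj) (by omega))
        (fun j hj hjk => h2 (j + 1) (by simpa using hj) (by omega))

-- B's bisect step on a sorted occurrence list is find? of the first element > c
theorem pvBisect_find (occ : List Int) (c : Int) (hs : occ.Pairwise (· ≤ ·)) :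
    (if PySem.List.bisectRight occ c = occ.length then none
     else some (PySem.List.pyGetD occ ((PySem.List.bisectRight occ c : Nat) : Int) 0))
      = occ.find? (fun p => decide (c < p)) := by
  obtain ⟨hle, hlo, hhi⟩ := PySem.List.bisectRight_spec occ c hs
  rw [pvFind_split (fun p => decide (c < p)) occ (PySem.List.bisectRight occ c) hle
      (fun j hj hjk => by simpa using (by exact not_lt.2 (hlo j hj hjk) : ¬ c < occ[j]))
      (fun j hj hjk => by simpa using hhi j hj hjk)]
  by_cases h : PySem.List.bisectRight occ c = occ.length
  · simp [h]
  · have hlt : PySem.List.bisectRight occ c < occ.length := lt_of_le_of_ne hle h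
    rw [if_neg h]
    rw [PySem.List.pyGetD_natCast]
    simp [List.getD, List.getElem?_eq_getElem hlt]

-- A's index-from-k step equals find? of the first occurrence-index > c
theorem pvIndexFrom_occ (t : String) :
    ∀ (fs : List String) (s c : Int),
    (pvOcc fs t s).find? (fun p => decide (c < p))
      = (PySem.List.index? (fs.drop (c + 1 - s).toNat) t).map
          (fun j => s + ((c + 1 - s).toNat : Int) + (j : Int)) := by
  intro fs
  induction fs with
  | nil => intro s c; simp [pvOcc_nil]
  | cons x xs ih =>
    intro s c
    rw [pvOcc_cons]
    by_cases hcs : c + 1 - s ≤ 0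
    · -- c < s: nothing dropped; the head is eligible
      have hz : (c + 1 - s).toNat = 0 := by omega
      rw [hz]
      simp only [List.drop_zero, Nat.cast_zero]
      by_cases hx : x = t
      · subst hx
        rw [PySem.List.index?_cons_self]
        have hcls : decide (c < s) = true := by simp; omega
        simp [hcls]
      · have hxb : (x == t) = false := by simp [hx]
        rw [hxb]
        simp only [if_neg Bool.false_ne_true, List.nil_append]
        rw [ih (s + 1) c]
        have hz1 : (c + 1 - (s + 1)).toNat = 0 := by omega
        rw [hz1]
        rw [PySem.List.index?_cons_of_ne xs hx]
        simp only [List.drop_zero, Nat.cast_zero]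
        cases PySem.List.index? xs t with
        | none => simp
        | some j => simp; omega
    · -- s ≤ c: the head (index s) is ≤ c, skip it on both sides
      have hd : (c + 1 - s).toNat = (c + 1 - (s + 1)).toNat + 1 := by omega
      rw [List.find?_append]
      have hnone : List.find? (fun p => decide (c < p)) (if x == t then [s] else []) = none := by
        by_cases hx : x = t
        · have hf : decide (c < s) = false := by simp; omega
          simp [hx, hf]
        · simp [hx]
      rw [hnone, Option.none_or]
      rw [ih (s + 1) c, hd]
      simp only [List.drop_succ_cons]
      congr 1
      funext j
      omega

-- the two inner loops agree on any nonnegative current position, and keep it nonnegative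
theorem pvSteps_agree (fs : List String) (rest : List String) :
    ∀ (c : Int), 0 ≤ c →
    rest.foldl (pvAStep fs) (some c) = rest.foldl (pvBStep (pvPositions fs)) (some c) := by
  induction rest with
  | nil => intro c _; rfl
  | cons t ts ih =>
    intro c hc
    simp only [List.foldl_cons]
    have hstep : pvAStep fs (some c) t = pvBStep (pvPositions fs) (some c) t := by
      show pvIndexFrom fs t (c + 1) =
        (if PySem.List.bisectRight ((pvPositions fs).getD t []) c = ((pvPositions fs).getD t []).length then none
         else some (PySem.List.pyGetD ((pvPositions fs).getD t [])
           ((PySem.List.bisectRight ((pvPositions fs).getD t []) c : Nat) : Int) 0))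
      rw [pvPositions_getD]
      rw [pvBisect_find (pvOcc fs t 0) c (pvOcc_sorted fs t 0)]
      rw [pvIndexFrom_occ t fs 0 c]
      unfold pvIndexFrom
      have h1 : PySem.List.slice fs (some (c + 1)) none = fs.drop (c + 1).toNat := by
        have : c + 1 = ((c + 1).toNat : Int) := by omega
        rw [this, PySem.List.slice_from_natCast]
        simp
        omega
      rw [h1]
      have h2 : (c + 1 - 0).toNat = (c + 1).toNat := by omega
      rw [h2]
      congr 1
      funext j
      omega
    rw [hstep]
    cases hres : pvBStep (pvPositions fs) (some c) t with
    | none =>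
      have hnone : ∀ (l : List String), l.foldl (pvAStep fs) none = none := by
        intro l; induction l with
        | nil => rfl
        | cons a as iha => simpa [pvAStep] using iha
      have hnone' : ∀ (l : List String), l.foldl (pvBStep (pvPositions fs)) none = none := by
        intro l; induction l with
        | nil => rfl
        | cons a as iha => simpa [pvBStep] using iha
      rw [hnone, hnone']
    | some c' =>
      have hc' : 0 ≤ c' := by
        unfold pvBStep at hres
        simp only at hres
        split at hres
        · exact absurd hres (by simp)
        · rename_i hk
          have hlt : PySem.List.bisectRight ((pvPositions fs).getD t []) c
              < ((pvPositions fs).getD t []).length :=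
            lt_of_le_of_ne (PySem.List.bisectRight_spec _ c (by
              rw [pvPositions_getD]; exact pvOcc_sorted fs t 0)).1 hk
          have hmem : PySem.List.pyGetD ((pvPositions fs).getD t [])
              ((PySem.List.bisectRight ((pvPositions fs).getD t []) c : Nat) : Int) 0
              ∈ (pvPositions fs).getD t [] := by
            rw [PySem.List.pyGetD_natCast]
            simp [List.getD, List.getElem?_eq_getElem hlt]
          have h0 : ∀ x ∈ (pvPositions fs).getD t [], (0 : Int) ≤ x := by
            rw [pvPositions_getD]; exact pvOcc_lb fs t 0
          have := h0 _ hmem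
          simp only [Option.some.injEq] at hres
          omega
      exact ih c' hc'

theorem pvBStep_none (pos : PySem.Dict String (List Int)) (l : List String) :
    l.foldl (pvBStep pos) none = none := by
  induction l with
  | nil => rfl
  | cons a as ih => simpa [pvBStep] using ih

theorem pvBStep_lt (fs : List String) (t : String) (c c' : Int)
    (h : pvBStep (pvPositions fs) (some c) t = some c') : c < c' := by
  unfold pvBStep at h
  simp only at h
  split at h
  · exact absurd h (by simp)
  · rename_i hk
    have hsorted : ((pvPositions fs).getD t []).Pairwise (· ≤ ·) := by
      rw [pvPositions_getD]; exact pvOcc_sorted fs t 0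
    obtain ⟨hle, _, hhi⟩ := PySem.List.bisectRight_spec ((pvPositions fs).getD t []) c hsorted
    have hlt : PySem.List.bisectRight ((pvPositions fs).getD t []) c
        < ((pvPositions fs).getD t []).length := lt_of_le_of_ne hle hk
    have := hhi _ hlt le_rfl
    simp only [Option.some.injEq] at h
    rw [← h]
    rw [PySem.List.pyGetD_natCast]
    simpa [List.getD, List.getElem?_eq_getElem hlt] using this

theorem pvInner_lb (fs : List String) :
    ∀ (rest : List String) (c cur : Int),
    rest.foldl (pvBStep (pvPositions fs)) (some c) = some cur →
    c + rest.length ≤ cur := by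
  intro rest
  induction rest with
  | nil => intro c cur h; simp at h; simp; omega
  | cons t ts ih =>
    intro c cur h
    simp only [List.foldl_cons] at h
    cases hs : pvBStep (pvPositions fs) (some c) t with
    | none => rw [hs, pvBStep_none] at h; exact absurd h (by simp)
    | some c' =>
      rw [hs] at h
      have h1 := pvBStep_lt fs t c c' hs
      have h2 := ih c' cur h
      simp only [List.length_cons]
      push_cast
      omega

theorem pvBOuter_stay (fs : List String) (rest : List String) (s : Int) :
    pvBOuter (pvPositions fs) rest (some ((rest.length : Int) + 1)) s
      = some ((rest.length : Int) + 1) := by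
  unfold pvBOuter
  cases hinner : rest.foldl (pvBStep (pvPositions fs)) (some s) with
  | none => rfl
  | some cur =>
    have := pvInner_lb fs rest s cur hinner
    simp only
    rw [if_neg (by omega)]

theorem pvFold_stay (fs : List String) (rest : List String) :
    ∀ (ss : List Int),
    ss.foldl (pvBOuter (pvPositions fs) rest) (some ((rest.length : Int) + 1))
      = some ((rest.length : Int) + 1) := by
  intro ss
  induction ss with
  | nil => rfl
  | cons s ss ih => simpa [pvBOuter_stay fs rest s] using ih

theorem pvFoldl_eq_pvBFold (fs : List String) (rest : List String) :
    ∀ (ss : List Int) (best : Option Int),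
    ss.foldl (pvBOuter (pvPositions fs) rest) best
      = pvBFold (pvPositions fs) rest ((rest.length : Int) + 1) ss best := by
  intro ss
  induction ss with
  | nil => intro best; rfl
  | cons s ss ih =>
    intro best
    simp only [List.foldl_cons, pvBFold]
    by_cases h : pvBOuter (pvPositions fs) rest best s = some ((rest.length : Int) + 1)
    · rw [if_pos h, h, pvFold_stay]
    · rw [if_neg h, ih]

-- ===== VERDICT (by name: the statement is the Claim_ definition above) =====
theorem find_ordered_span_spec : Claim_equal_find_ordered_span := by
  intro qs fs _
  unfold Spec_find_ordered_span
  match qs, fs with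
  | [], _ => rfl
  | _ :: _, [] => rfl
  | first :: rest, f0 :: frest =>
    unfold find_ordered_span find_ordered_span_alt
    simp only
    rw [pvPositions_getD]
    have hstarts : ((PySem.List.enumerate (f0 :: frest)).filter (fun p => p.2 == first)).map
        (fun p => p.1) = pvOcc (f0 :: frest) first 0 := rfl
    rw [hstarts]
    have hcongr : (pvOcc (f0 :: frest) first 0).foldl (fun best start =>
        match rest.foldl (pvAStep (f0 :: frest)) (some start) with
        | none => best
        | some current =>
          let span := current - start + 1
          match best with
          | none => some span
          | some b => if span < b then some span else best) none
        = (pvOcc (f0 :: frest) first 0).foldl (pvBOuter (pvPositions (f0 :: frest)) rest) none := by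
      apply PySem.List.foldl_congr_mem
      intro best start hstart
      have h0 : (0 : Int) ≤ start := pvOcc_lb _ _ _ start hstart
      unfold pvBOuter
      rw [pvSteps_agree (f0 :: frest) rest start h0]
    rw [hcongr, pvFoldl_eq_pvBFold]
    congr 1
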